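-- pv_equiv track=rewrite | github.com/mathispesai/IndIngUgent | informatica/Python/kopzorgen_voor_noah.py | splitsing
-- ===== SOURCE A (Python) =====
-- def splitsing(woord:str)->tuple:
--     prefix = ""
--     suffix = ""
--     while woord:
--         if woord[0] not in "aeiouAEIOU":
--             prefix += woord[0]
--             woord = woord[1:]
--         else:
--             suffix = woord
--             woord = ""
--     return (prefix,suffix)
-- ===== SOURCE B (Python) =====
-- def splitsing(woord: str) -> tuple:
--     idx = min((woord.find(v) for v in "aeiouAEIOU" if v in woord),
--               default=len(woord))
--     return (woord[:idx], woord[idx:])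
-- ===== Notes on version B (the rewrite author's own statement) =====
-- stated objective: alternative
-- what changed: Replaces the per-character while loop that repeatedly reslices the string with one substring search per vowel (min of str.find over vowels present) followed by a single pair of slices.
import Mathlib
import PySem

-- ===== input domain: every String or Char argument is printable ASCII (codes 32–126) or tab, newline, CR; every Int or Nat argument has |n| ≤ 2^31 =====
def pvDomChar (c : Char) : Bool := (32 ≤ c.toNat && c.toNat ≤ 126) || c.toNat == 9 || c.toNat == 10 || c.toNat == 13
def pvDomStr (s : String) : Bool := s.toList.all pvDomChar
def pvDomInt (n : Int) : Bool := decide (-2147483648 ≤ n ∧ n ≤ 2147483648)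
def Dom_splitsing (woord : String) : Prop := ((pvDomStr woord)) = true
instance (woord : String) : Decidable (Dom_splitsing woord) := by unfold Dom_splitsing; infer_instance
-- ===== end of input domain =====

-- B replaces A's per-character loop (with repeated reslicing) by one find per vowel and a single pair of slices (alternative decomposition; speed not measured).


-- ===== PORT A =====
-- literal port of A's while loop: state (prefix, suffix, woord); each step either
-- appends woord[0] to prefix and drops it, or sets suffix := woord and woord := ""
def splitsingGo (pfx sfx w : List Char) : List Char × List Char :=
  match w with
  | [] => (pfx, sfx)
  | c :: rest =>
    if PySem.Chars.isIn [c] "aeiouAEIOU".toList = false then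
      splitsingGo (pfx ++ [c]) sfx rest
    else
      splitsingGo pfx (c :: rest) []

def splitsing (woord : String) : List String :=
  let r := splitsingGo [] [] woord.toList
  [String.ofList r.1, String.ofList r.2]

-- ===== PORT B =====
-- port of Source B: min of find-per-vowel (only vowels that occur), default len(woord); then two slices
def splitsing_alt (woord : String) : List String :=
  let cs := woord.toList
  let cands := ("aeiouAEIOU".toList).filterMap (fun v =>
    if PySem.Chars.isIn [v] cs then some (PySem.Chars.find cs [v]) else none)
  let idx := (PySem.List.min? cands (fun x => x)).getD (cs.length : Int)
  [String.ofList (PySem.List.slice cs none (some idx)),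
   String.ofList (PySem.List.slice cs (some idx) none)]

-- ===== PRECONDITION & SPEC =====
def Spec_splitsing (woord : String) (out : List String) : Prop := out = splitsing_alt woord
instance (woord : String) (out : List String) : Decidable (Spec_splitsing woord out) := by unfold Spec_splitsing; infer_instance

-- ===== CLAIM (what is proved, stated in full; the proofs are below) =====
def Claim_equal_splitsing : Prop := ∀ (woord : String), Dom_splitsing woord → Spec_splitsing woord (splitsing woord)

-- ===== LEMMAS AND PROOFS =====

def pvIsV (c : Char) : Bool := PySem.Chars.isIn [c] "aeiouAEIOU".toList

theorem pv_singleton_infix_iff {α : Type} (a : α) (l : List α) : [a] <:+: l ↔ a ∈ l := by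
  constructor
  · intro h; exact h.subset (List.mem_singleton_self a)
  · intro h
    obtain ⟨s, t, rfl⟩ := List.append_of_mem h
    exact ⟨s, t, by simp⟩

theorem pv_isIn_singleton_iff (c : Char) (l : List Char) :
    PySem.Chars.isIn [c] l = true ↔ c ∈ l := by
  rw [PySem.Chars.isIn_iff_infix, pv_singleton_infix_iff]

theorem pv_singleton_prefix_iff {α : Type} (a : α) (l : List α) : [a] <+: l ↔ l.head? = some a := by
  cases l with
  | nil => simp
  | cons x t =>
    constructor
    · rintro ⟨u, hu⟩; simp at hu; simp [hu.1]
    · intro h; simp at h; exact ⟨t, by simp [h]⟩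

-- A's loop computes (prefix ++ takeWhile nonvowel, dropWhile nonvowel)
theorem pv_goA (cs : List Char) : ∀ p : List Char,
    splitsingGo p [] cs =
      (p ++ cs.takeWhile (fun c => !(pvIsV c)), cs.dropWhile (fun c => !(pvIsV c))) := by
  induction cs with
  | nil => intro p; simp [splitsingGo]
  | cons c rest ih =>
    intro p
    by_cases h : PySem.Chars.isIn [c] "aeiouAEIOU".toList = false
    · have hb : pvIsV c = false := h
      rw [splitsingGo, if_pos h, ih]
      simp [hb]
    · rw [splitsingGo, if_neg h, splitsingGo]
      have h' : pvIsV c = true := by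
        unfold pvIsV; revert h; cases PySem.Chars.isIn [c] "aeiouAEIOU".toList <;> simp
      simp [h']

-- in the rest, t := (cs.takeWhile (fun c => !(pvIsV c))).length
theorem pv_takeWhile_getElem? (cs : List Char) (i : Nat)
    (hi : i < (cs.takeWhile (fun c => !(pvIsV c))).length) :
    ∃ c, cs[i]? = some c ∧ pvIsV c = false := by
  have hpre := List.takeWhile_prefix (l := cs) (p := fun c => !(pvIsV c))
  have htake : cs.takeWhile (fun c => !(pvIsV c)) =
      cs.take (cs.takeWhile (fun c => !(pvIsV c))).length := List.prefix_iff_eq_take.1 hpre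
  refine ⟨(cs.takeWhile (fun c => !(pvIsV c)))[i], ?_, ?_⟩
  · have h1 : (cs.take (cs.takeWhile (fun c => !(pvIsV c))).length)[i]? = cs[i]? := by
      rw [List.getElem?_take]; simp [hi]
    rw [← h1, ← htake, List.getElem?_eq_getElem hi]
  · have hmem : (cs.takeWhile (fun c => !(pvIsV c)))[i] ∈ cs.takeWhile (fun c => !(pvIsV c)) :=
      List.getElem_mem hi
    have := List.mem_takeWhile_imp hmem
    simpa using this

theorem pv_dropWhile_eq_drop (cs : List Char) :
    cs.dropWhile (fun c => !(pvIsV c)) =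
      cs.drop (cs.takeWhile (fun c => !(pvIsV c))).length := by
  have h := congrArg (List.drop (cs.takeWhile (fun c => !(pvIsV c))).length)
    (List.takeWhile_append_dropWhile (p := fun c => !(pvIsV c)) (l := cs))
  rw [List.drop_left] at h
  exact h

theorem pv_head_dropWhile (cs : List Char)
    (h : (cs.takeWhile (fun c => !(pvIsV c))).length < cs.length) :
    ∃ v, cs[(cs.takeWhile (fun c => !(pvIsV c))).length]? = some v ∧ pvIsV v = true := by
  have hdw : cs.dropWhile (fun c => !(pvIsV c)) ≠ [] := by
    intro hnil
    have h2 := pv_dropWhile_eq_drop cs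
    rw [hnil] at h2
    have := congrArg List.length h2
    simp at this
    omega
  obtain ⟨v, t, hv⟩ := List.exists_cons_of_ne_nil hdw
  refine ⟨v, ?_, ?_⟩
  · have h2 := pv_dropWhile_eq_drop cs
    rw [hv] at h2
    rw [← List.head?_drop, ← h2]; rfl
  · have h3 := List.head?_dropWhile_not (p := fun c => !(pvIsV c)) (l := cs)
    rw [hv] at h3
    simp at h3
    exact h3

-- find cs [v] characterisation for a vowel occurring in cs
theorem pv_find_spec (cs : List Char) (v : Char) (hv : v ∈ cs) :
    ∃ j : Nat, PySem.Chars.find cs [v] = (j : Int) ∧ cs[j]? = some v ∧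
      ∀ i : Nat, i < j → cs[i]? ≠ some v := by
  have hne : PySem.Chars.find cs [v] ≠ -1 := by
    rw [Ne, PySem.Chars.find_eq_neg_one_iff]
    intro h; exact h ((pv_singleton_infix_iff v cs).2 hv)
  have hff : PySem.Chars.findFrom cs [v] ((0 : Nat) : Int) none ≠ -1 := by
    simpa using hne
  have hspec := PySem.Chars.findFrom_natCast_spec cs [v] 0 (Nat.zero_le _) hff
  simp only [Nat.cast_zero, PySem.Chars.findFrom_zero] at hspec
  obtain ⟨h0, hpre, hmin⟩ := hspec
  have h0' : 0 ≤ PySem.Chars.find cs [v] := h0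
  refine ⟨(PySem.Chars.find cs [v]).toNat, by omega, ?_, ?_⟩
  · have := (pv_singleton_prefix_iff v _).1 hpre
    rwa [List.head?_drop] at this
  · intro i hij hcontra
    refine hmin i (Nat.zero_le _) hij ?_
    rw [pv_singleton_prefix_iff, List.head?_drop]
    exact hcontra

-- every candidate find-value is ≥ t
theorem pv_cands_ge (cs : List Char) (x : Int)
    (hx : x ∈ ("aeiouAEIOU".toList).filterMap (fun v =>
      if PySem.Chars.isIn [v] cs then some (PySem.Chars.find cs [v]) else none)) :
    ((cs.takeWhile (fun c => !(pvIsV c))).length : Int) ≤ x := by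
  rw [List.mem_filterMap] at hx
  obtain ⟨v, hvV, hvx⟩ := hx
  by_cases hin : PySem.Chars.isIn [v] cs
  · rw [if_pos hin, Option.some_inj] at hvx
    subst hvx
    obtain ⟨j, hj, hget, _⟩ := pv_find_spec cs v ((pv_isIn_singleton_iff v cs).1 hin)
    rw [hj]
    by_contra hlt
    push_cast at hlt
    have hjt : j < (cs.takeWhile (fun c => !(pvIsV c))).length := by omega
    obtain ⟨c, hc, hcv⟩ := pv_takeWhile_getElem? cs j hjt
    rw [hget] at hc
    have hvv : pvIsV v = true := by
      unfold pvIsV; rw [pv_isIn_singleton_iff]; exact hvV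
    simp at hc
    rw [← hc, hvv] at hcv
    simp at hcv
  · rw [if_neg hin] at hvx; exact absurd hvx (by simp)

-- B's index equals t
theorem pv_idx_eq (cs : List Char) :
    ((PySem.List.min? (("aeiouAEIOU".toList).filterMap (fun v =>
        if PySem.Chars.isIn [v] cs then some (PySem.Chars.find cs [v]) else none))
        (fun x => x)).getD (cs.length : Int)) =
      ((cs.takeWhile (fun c => !(pvIsV c))).length : Int) := by
  set t := (cs.takeWhile (fun c => !(pvIsV c))).length with ht
  set cands := ("aeiouAEIOU".toList).filterMap (fun v =>
    if PySem.Chars.isIn [v] cs then some (PySem.Chars.find cs [v]) else none) with hcands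
  have htle : t ≤ cs.length := (List.takeWhile_prefix _).length_le
  by_cases hlt : t < cs.length
  · -- a vowel occurs; (t : Int) is in cands and is minimal there
    obtain ⟨v, hget, hv⟩ := pv_head_dropWhile cs hlt
    have hvmem : v ∈ cs := List.mem_of_getElem? hget
    have hin : PySem.Chars.isIn [v] cs = true := (pv_isIn_singleton_iff v cs).2 hvmem
    have hvV : v ∈ "aeiouAEIOU".toList := by
      unfold pvIsV at hv; rwa [pv_isIn_singleton_iff] at hv
    obtain ⟨j, hj, hjget, hjmin⟩ := pv_find_spec cs v hvmem
    have hjt : j = t := by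
      have hge : ((cs.takeWhile (fun c => !(pvIsV c))).length : Int) ≤ PySem.Chars.find cs [v] := by
        apply pv_cands_ge
        rw [List.mem_filterMap]
        exact ⟨v, hvV, by rw [if_pos hin]⟩
      rw [hj] at hge
      have hge' : t ≤ j := by rw [ht]; exact_mod_cast hge
      rcases Nat.lt_or_ge t j with hc | hc
      · exact absurd hget (hjmin t hc)
      · omega
    have hmem : (t : Int) ∈ cands := by
      rw [hcands, List.mem_filterMap]
      exact ⟨v, hvV, by rw [if_pos hin, hj, hjt]⟩
    obtain ⟨m, hm⟩ : ∃ m, PySem.List.min? cands (fun x => x) = some m := by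
      cases hmo : PySem.List.min? cands (fun x => x) with
      | none =>
        have : cands = [] := (PySem.List.min?_eq_none_iff cands (fun x => x)).1 hmo
        rw [this] at hmem; simp at hmem
      | some m => exact ⟨m, rfl⟩
    have hmmem : m ∈ cands := PySem.List.min?_mem hm
    have h1 : (t : Int) ≤ m := pv_cands_ge cs m hmmem
    have h2 : m ≤ (t : Int) := PySem.List.min?_isMin hm (t : Int) hmem
    rw [hm]
    simp
    omega
  · -- no vowel in cs: cands = [] and t = cs.length
    have hteq : t = cs.length := by omega
    have hnov : ∀ c ∈ cs, pvIsV c = false := by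
      intro c hc
      have hall : cs.takeWhile (fun c => !(pvIsV c)) = cs :=
        List.IsPrefix.eq_of_length (List.takeWhile_prefix _) hteq
      have := List.mem_takeWhile_imp (p := fun c => !(pvIsV c)) (by rwa [hall] : c ∈ cs.takeWhile (fun c => !(pvIsV c)))
      simpa using this
    have hcnil : cands = [] := by
      rw [hcands, List.filterMap_eq_nil_iff]
      intro v hvV
      rw [if_neg]
      intro hin
      have hvm := (pv_isIn_singleton_iff v cs).1 hin
      have h1 := hnov v hvm
      have h2 : pvIsV v = true := by
        unfold pvIsV; rw [pv_isIn_singleton_iff]; exact hvV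
      rw [h1] at h2; exact absurd h2 (by simp)
    have hmn : PySem.List.min? ([] : List Int) (fun x => x) = none :=
      (PySem.List.min?_eq_none_iff _ _).2 rfl
    rw [hcnil, hmn]
    simp [hteq]

-- ===== VERDICT (by name: the statement is the Claim_ definition above) =====
theorem splitsing_spec : Claim_equal_splitsing := by
  intro woord _
  unfold Spec_splitsing splitsing splitsing_alt
  dsimp only
  rw [pv_goA, pv_idx_eq]
  set cs := woord.toList
  set t := (cs.takeWhile (fun c => !(pvIsV c))).length with ht
  have h1 : PySem.List.slice cs none (some (t : Int)) = cs.takeWhile (fun c => !(pvIsV c)) := by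
    rw [PySem.List.slice_to_natCast]
    exact (List.prefix_iff_eq_take.1 (List.takeWhile_prefix _)).symm
  have h2 : PySem.List.slice cs (some (t : Int)) none = cs.dropWhile (fun c => !(pvIsV c)) := by
    rw [PySem.List.slice_from_natCast]
    exact (pv_dropWhile_eq_drop cs).symm
  rw [h1, h2]
  simp
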